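-- pv_equiv track=rewrite | github.com/Manitary/advent-of-code | 2016/python/day07.py | is_ssl
-- ===== SOURCE A (Python) =====
-- def is_aba(s: str, i: int) -> bool:
--     return s[i] == s[i + 2] != s[i + 1] and s[i : i + 3].isalpha()
--
-- def is_ssl(s: str) -> bool:
--     outside: set[str] = set()
--     inside: set[str] = set()
--     brackets = 0
--     for i in range(len(s) - 2):
--         if s[i] == "[":
--             brackets += 1
--             continue
--         if s[i] == "]":
--             brackets -= 1
--             continue
--         if is_aba(s, i):
--             aba = s[i : i + 3]
--             bab = aba[1] + aba[0] + aba[1]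
--             if brackets:
--                 if bab in outside:
--                     return True
--                 inside.add(aba)
--             else:
--                 if bab in inside:
--                     return True
--                 outside.add(aba)
--     return False
-- ===== SOURCE B (Python) =====
-- def is_ssl(s: str) -> bool:
--     # Phase 1: parse into bracket-free segments, each tagged with whether it
--     # lies inside brackets (signed depth != 0 at the time of its characters).
--     segments = []
--     depth = 0
--     cur = ""
--     for ch in s:
--         if ch == "[" or ch == "]":
--             segments.append((cur, depth != 0))
--             depth += 1 if ch == "[" else -1
--             cur = ""
--         else:
--             cur += ch
--     segments.append((cur, depth != 0))
--     # Phase 2: extract every ABA from each segment into two sets.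
--     outside = set()
--     inside = set()
--     for seg, is_inside in segments:
--         for j in range(len(seg) - 2):
--             w = seg[j : j + 3]
--             if w[0] == w[2] != w[1] and w.isalpha():
--                 (inside if is_inside else outside).add(w)
--     # Phase 3: match.
--     return any(w[1] + w[0] + w[1] in inside for w in outside)
-- ===== Notes on version B (the rewrite author's own statement) =====
-- stated objective: alternative
-- what changed: Replaces A's fused single-pass early-exit scan (bracket counter plus two growing sets with mid-loop returns) by a three-phase pipeline: parse the string into bracket-delimited segments tagged inside/outside by the signed depth, extract every ABA from each segment, then test whether some outside ABA has its reversed BAB among the inside ones.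
import Mathlib
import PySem

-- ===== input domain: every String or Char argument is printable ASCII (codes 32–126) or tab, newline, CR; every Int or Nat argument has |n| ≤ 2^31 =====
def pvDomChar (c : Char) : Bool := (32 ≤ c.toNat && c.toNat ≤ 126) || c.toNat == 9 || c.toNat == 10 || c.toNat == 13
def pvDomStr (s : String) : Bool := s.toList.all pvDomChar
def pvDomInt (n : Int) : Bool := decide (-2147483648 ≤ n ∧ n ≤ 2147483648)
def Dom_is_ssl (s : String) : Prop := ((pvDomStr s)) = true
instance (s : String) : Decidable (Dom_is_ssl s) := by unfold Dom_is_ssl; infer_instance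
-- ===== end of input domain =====

-- B replaces A's fused early-exit scan by three passes — parse into bracket
-- segments, extract ABAs per segment, then match — same result (idiomatic
-- decomposition, not claimed faster).

-- ===== PORT A =====
-- is_aba(s, i): s[i] == s[i+2] != s[i+1] and s[i:i+3].isalpha()
-- (the None branches are unreachable from is_ssl's loop, whose indices are in range)
def pvIsAbaA (cs : List Char) (i : Int) : Bool :=
  match PySem.List.pyGet? cs i, PySem.List.pyGet? cs (i + 2), PySem.List.pyGet? cs (i + 1) with
  | some x, some z, some y =>
      x == z && !(z == y) && PySem.Chars.strIsalpha (PySem.List.slice cs (some i) (some (i + 3)))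
  | _, _, _ => false

-- bab = aba[1] + aba[0] + aba[1]  (aba always has length 3 at the call site)
def pvBabA (aba : List Char) : List Char :=
  match PySem.List.pyGet? aba 1, PySem.List.pyGet? aba 0 with
  | some b, some a => [b, a, b]
  | _, _ => []

-- the for-loop of A, with its early returns and the running sets/counter
def pvLoopA (cs : List Char) (idxs : List Int)
    (outside inside : PySem.Set (List Char)) (brackets : Int) : Bool :=
  match idxs with
  | [] => false
  | i :: rest =>
    if PySem.List.pyGet? cs i == some '[' then
      pvLoopA cs rest outside inside (brackets + 1)
    else if PySem.List.pyGet? cs i == some ']' then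
      pvLoopA cs rest outside inside (brackets - 1)
    else if pvIsAbaA cs i then
      let aba := PySem.List.slice cs (some i) (some (i + 3))
      let bab := pvBabA aba
      if brackets ≠ 0 then
        if bab ∈ outside then true
        else pvLoopA cs rest outside (inside.add aba) brackets
      else
        if bab ∈ inside then true
        else pvLoopA cs rest (outside.add aba) inside brackets
    else pvLoopA cs rest outside inside brackets

def is_ssl (s : String) : Bool :=
  pvLoopA s.toList (PySem.List.pyRange 0 (PySem.Str.len s - 2) 1) [] [] 0

-- ===== PORT B =====
-- phase 1 of Source B: walk the characters, cutting a segment at every bracket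
def pvParseB (cs : List Char) (segments : List (List Char × Bool))
    (depth : Int) (cur : List Char) : List (List Char × Bool) :=
  match cs with
  | [] => segments ++ [(cur, decide (depth ≠ 0))]
  | ch :: rest =>
    if ch == '[' || ch == ']' then
      pvParseB rest (segments ++ [(cur, decide (depth ≠ 0))])
        (depth + (if ch == '[' then 1 else -1)) []
    else
      pvParseB rest segments depth (cur ++ [ch])

-- w[0] == w[2] != w[1] and w.isalpha()
def pvGoodB (w : List Char) : Bool :=
  match PySem.List.pyGet? w 0, PySem.List.pyGet? w 2, PySem.List.pyGet? w 1 with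
  | some a, some c, some b => a == c && !(c == b) && PySem.Chars.strIsalpha w
  | _, _, _ => false

-- w[1] + w[0] + w[1]
def pvBabB (w : List Char) : List Char :=
  match PySem.List.pyGet? w 1, PySem.List.pyGet? w 0 with
  | some b, some a => [b, a, b]
  | _, _ => []

-- phase 2, inner loop: for j in range(len(seg) - 2)
def pvExtractB (seg : List Char) (is_inside : Bool) (idxs : List Int)
    (outside inside : PySem.Set (List Char)) :
    PySem.Set (List Char) × PySem.Set (List Char) :=
  match idxs with
  | [] => (outside, inside)
  | j :: rest =>
    let w := PySem.List.slice seg (some j) (some (j + 3))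
    if pvGoodB w then
      if is_inside then pvExtractB seg is_inside rest outside (inside.add w)
      else pvExtractB seg is_inside rest (outside.add w) inside
    else pvExtractB seg is_inside rest outside inside

-- phase 2, outer loop: for seg, is_inside in segments
def pvExtractSegsB (segs : List (List Char × Bool))
    (outside inside : PySem.Set (List Char)) :
    PySem.Set (List Char) × PySem.Set (List Char) :=
  match segs with
  | [] => (outside, inside)
  | (seg, f) :: rest =>
    let p := pvExtractB seg f (PySem.List.pyRange 0 (PySem.Chars.len seg - 2) 1) outside inside
    pvExtractSegsB rest p.1 p.2

def is_ssl_alt (s : String) : Bool :=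
  let segs := pvParseB s.toList [] 0 []
  let p := pvExtractSegsB segs [] []
  p.1.any (fun w => decide (pvBabB w ∈ p.2))

-- ===== PRECONDITION & SPEC =====
def Spec_is_ssl (s : String) (out : Bool) : Prop := out = is_ssl_alt s
instance (s : String) (out : Bool) : Decidable (Spec_is_ssl s out) := by unfold Spec_is_ssl; infer_instance

-- ===== CLAIM (what is proved, stated in full; the proofs are below) =====
def Claim_equal_is_ssl : Prop := ∀ (s : String), Dom_is_ssl s → Spec_is_ssl s (is_ssl s)

-- ===== LEMMAS AND PROOFS =====

-- prefix depth: brackets counter of A / depth of B after the first k characters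
def pvDep (cs : List Char) (k : Nat) : Int :=
  ((cs.take k).count '[' : Int) - ((cs.take k).count ']' : Int)

-- the window s[i:i+3]
def pvWin (cs : List Char) (i : Nat) : List Char := (cs.drop i).take 3

def pvGout (cs : List Char) (i : Nat) : Prop :=
  i + 2 < cs.length ∧ pvGoodB (pvWin cs i) = true ∧ pvDep cs i = 0

def pvGin (cs : List Char) (j : Nat) : Prop :=
  j + 2 < cs.length ∧ pvGoodB (pvWin cs j) = true ∧ pvDep cs j ≠ 0

-- the common characterisation: an ABA outside brackets whose BAB occurs inside
def pvCross (cs : List Char) : Prop :=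
  ∃ i j : Nat, pvGout cs i ∧ pvGin cs j ∧ pvWin cs j = pvBabA (pvWin cs i)

lemma pv_win_eq (cs : List Char) (i : Nat) (h : i + 2 < cs.length) :
    pvWin cs i = [cs[i], cs[i+1], cs[i+2]] := by
  unfold pvWin
  rw [List.drop_eq_getElem_cons (show i < cs.length by omega)]
  rw [List.drop_eq_getElem_cons (show i + 1 < cs.length by omega)]
  rw [List.drop_eq_getElem_cons (show i + 2 < cs.length by omega)]
  rfl

lemma pv_bab_pair (x y z : Char) : pvBabA [x, y, z] = [y, x, y] := rfl

lemma pvBabB_eq (w : List Char) : pvBabB w = pvBabA w := rfl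

-- the shape a window passing B's test must have
lemma pv_good_shape {w : List Char} (h : pvGoodB w = true) :
    ∃ a b r, w = a :: b :: a :: r ∧ (a == b) = false ∧ PySem.Chars.strIsalpha w = true := by
  unfold pvGoodB at h
  rw [show (0 : Int) = ((0 : Nat) : Int) from rfl, show (2 : Int) = ((2 : Nat) : Int) from rfl,
      show (1 : Int) = ((1 : Nat) : Int) from rfl,
      PySem.List.pyGet?_natCast, PySem.List.pyGet?_natCast, PySem.List.pyGet?_natCast] at h
  rcases w with _ | ⟨a, _ | ⟨b, _ | ⟨c, r⟩⟩⟩ <;> simp at h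
  obtain ⟨⟨h1, h2⟩, h3⟩ := h
  subst h1
  exact ⟨a, b, r, rfl, by simpa using h2, h3⟩

lemma pv_good_alpha {w : List Char} (h : pvGoodB w = true) :
    ∀ c ∈ w, PySem.Chars.isalpha c = true := by
  obtain ⟨a, b, r, hw, hab, hal⟩ := pv_good_shape h
  have h2 : ¬w = [] ∧ ∀ x ∈ w, PySem.Chars.isalpha x = true := by
    simpa [PySem.Chars.strIsalpha] using hal
  exact h2.2

lemma pv_win_len_le (cs : List Char) (i : Nat) : (pvWin cs i).length ≤ 3 := by
  simp [pvWin]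

lemma pv_good_len {seg : List Char} {j : Nat} (h : pvGoodB (pvWin seg j) = true) :
    j + 2 < seg.length := by
  obtain ⟨a, b, r, hw, -, -⟩ := pv_good_shape h
  have h1 : 3 ≤ (pvWin seg j).length := by rw [hw]; simp only [List.length_cons]; omega
  have h2 : (pvWin seg j).length ≤ seg.length - j := by simp [pvWin]
  have h3 : (pvWin seg j).length ≤ 3 := pv_win_len_le seg j
  omega

lemma pv_not_alpha_bracket {c : Char} (h : (c == '[' || c == ']') = true) :
    PySem.Chars.isalpha c = false := by
  have h' : c = '[' ∨ c = ']' := by simpa using h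
  rcases h' with h' | h' <;> subst h' <;> decide

-- a window containing a bracket never passes the test
lemma pv_good_bracket_mem {w : List Char} {c : Char} (hb : (c == '[' || c == ']') = true)
    (hm : c ∈ w) : pvGoodB w = false := by
  cases hg : pvGoodB w
  · rfl
  · exfalso
    have := pv_good_alpha hg c hm
    rw [pv_not_alpha_bracket hb] at this
    exact Bool.false_ne_true this

lemma pv_bab_bab {cs : List Char} {i : Nat}
    (h : pvGoodB (pvWin cs i) = true) : pvBabA (pvBabA (pvWin cs i)) = pvWin cs i := by
  obtain ⟨a, b, r, hw, -, -⟩ := pv_good_shape h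
  have hr : r = [] := by
    have hl := pv_win_len_le cs i
    rw [hw] at hl
    simp only [List.length_cons] at hl
    exact List.eq_nil_of_length_eq_zero (by omega)
  rw [hw, hr, pv_bab_pair, pv_bab_pair]

lemma pv_dep_zero (cs : List Char) : pvDep cs 0 = 0 := by
  simp [pvDep]

lemma pv_dep_succ (cs : List Char) (k : Nat) (h : k < cs.length) :
    pvDep cs (k+1) = pvDep cs k +
      (if cs[k] = '[' then 1 else if cs[k] = ']' then -1 else 0) := by
  have ht : cs.take (k+1) = cs.take k ++ [cs[k]] := by
    rw [List.take_add_one, List.getElem?_eq_getElem h]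
    rfl
  unfold pvDep
  rw [ht, List.count_append, List.count_append]
  split_ifs with h1 h2 <;> simp [List.count_cons, h1, *] <;> push_cast <;> omega

lemma pv_dep_cons (c : Char) (t : List Char) (i : Nat) :
    pvDep (c :: t) (i+1) =
      (if c = '[' then 1 else if c = ']' then -1 else 0) + pvDep t i := by
  unfold pvDep
  rw [List.take_succ_cons, List.count_cons, List.count_cons]
  by_cases h1 : c = '['
  · subst h1; simp; push_cast; ring
  · by_cases h2 : c = ']'
    · subst h2; simp [h1]; push_cast; ring
    · simp [h1, h2, Ne.symm h1, Ne.symm h2]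

lemma pv_slice_win (cs : List Char) (k : Nat) :
    PySem.List.slice cs (some (k : Int)) (some ((k : Int) + 3)) = pvWin cs k := by
  have := PySem.List.slice_natCast_add cs k 3
  unfold pvWin
  simpa using this

lemma pv_good_short {w : List Char} (h : w.length ≤ 2) : pvGoodB w = false := by
  rcases w with _ | ⟨a, _ | ⟨b, _ | ⟨c, r⟩⟩⟩
  · rfl
  · rfl
  · rfl
  · exfalso; simp only [List.length_cons] at h; omega

lemma pv_isAba_eq (cs : List Char) (k : Nat) :
    pvIsAbaA cs (k : Int) = pvGoodB (pvWin cs k) := by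
  by_cases h : k + 2 < cs.length
  · have h0 : PySem.List.pyGet? cs (k : Int) = some cs[k] := by
      rw [PySem.List.pyGet?_natCast]; exact List.getElem?_eq_getElem (by omega)
    have h1 : PySem.List.pyGet? cs ((k : Int) + 1) = some cs[k+1] := by
      rw [show ((k : Int) + 1) = ((k + 1 : Nat) : Int) by push_cast; ring,
          PySem.List.pyGet?_natCast]
      exact List.getElem?_eq_getElem (by omega)
    have h2 : PySem.List.pyGet? cs ((k : Int) + 2) = some cs[k+2] := by
      rw [show ((k : Int) + 2) = ((k + 2 : Nat) : Int) by push_cast; ring,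
          PySem.List.pyGet?_natCast]
      exact List.getElem?_eq_getElem (by omega)
    unfold pvIsAbaA
    rw [h0, h1, h2, pv_slice_win, pv_win_eq cs k h]
    rfl
  · have hlen : (pvWin cs k).length ≤ 2 := by simp [pvWin]; omega
    rw [pv_good_short hlen]
    have h2 : PySem.List.pyGet? cs ((k : Int) + 2) = none := by
      rw [show ((k : Int) + 2) = ((k + 2 : Nat) : Int) by push_cast; ring,
          PySem.List.pyGet?_natCast]
      exact List.getElem?_eq_none (by omega)
    by_cases hk : k < cs.length
    · have h0 : PySem.List.pyGet? cs (k : Int) = some cs[k] := by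
        rw [PySem.List.pyGet?_natCast]; exact List.getElem?_eq_getElem hk
      by_cases hk1 : k + 1 < cs.length
      · have h1 : PySem.List.pyGet? cs ((k : Int) + 1) = some cs[k+1] := by
          rw [show ((k : Int) + 1) = ((k + 1 : Nat) : Int) by push_cast; ring,
              PySem.List.pyGet?_natCast]
          exact List.getElem?_eq_getElem hk1
        unfold pvIsAbaA
        rw [h0, h1, h2]
      · have h1 : PySem.List.pyGet? cs ((k : Int) + 1) = none := by
          rw [show ((k : Int) + 1) = ((k + 1 : Nat) : Int) by push_cast; ring,
              PySem.List.pyGet?_natCast]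
          exact List.getElem?_eq_none (by omega)
        unfold pvIsAbaA
        rw [h0, h1, h2]
    · have h0 : PySem.List.pyGet? cs (k : Int) = none := by
        rw [PySem.List.pyGet?_natCast]; exact List.getElem?_eq_none (by omega)
      unfold pvIsAbaA
      rw [h0]

lemma pv_loopA_nil_iff (cs : List Char) (k : Nat) (outside inside : PySem.Set (List Char))
    (hk : (cs.length : Int) - 2 ≤ (k : Int))
    (Hno : ¬ ∃ i, i < k ∧ ∃ j, j < k ∧ pvGout cs i ∧ pvGin cs j ∧ pvWin cs j = pvBabA (pvWin cs i)) :
    (pvLoopA cs (PySem.List.pyRange (k : Int) ((cs.length : Int) - 2) 1) outside inside (pvDep cs k) = true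
      ↔ pvCross cs) := by
  rw [PySem.List.pyRange_one_eq_nil hk]
  simp only [pvLoopA]
  constructor
  · intro h; simp at h
  · rintro ⟨i, j, ⟨hi1, hi2, hi3⟩, ⟨hj1, hj2, hj3⟩, heq⟩
    exact absurd ⟨i, by omega, j, by omega, ⟨hi1, hi2, hi3⟩, ⟨hj1, hj2, hj3⟩, heq⟩ Hno

-- transferring the loop invariants across a step that adds nothing
lemma pv_step_dead (cs : List Char) (k : Nat) (hg : pvGoodB (pvWin cs k) = false)
    {outside inside : PySem.Set (List Char)}
    (Hout : ∀ x, x ∈ outside ↔ ∃ i, i < k ∧ pvGout cs i ∧ pvWin cs i = x)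
    (Hin : ∀ x, x ∈ inside ↔ ∃ j, j < k ∧ pvGin cs j ∧ pvWin cs j = x)
    (Hno : ¬ ∃ i, i < k ∧ ∃ j, j < k ∧ pvGout cs i ∧ pvGin cs j ∧ pvWin cs j = pvBabA (pvWin cs i)) :
    (∀ x, x ∈ outside ↔ ∃ i, i < k + 1 ∧ pvGout cs i ∧ pvWin cs i = x) ∧
    (∀ x, x ∈ inside ↔ ∃ j, j < k + 1 ∧ pvGin cs j ∧ pvWin cs j = x) ∧
    (¬ ∃ i, i < k + 1 ∧ ∃ j, j < k + 1 ∧ pvGout cs i ∧ pvGin cs j ∧ pvWin cs j = pvBabA (pvWin cs i)) := by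
  have hnoG : ¬ pvGout cs k := by rintro ⟨-, h, -⟩; rw [hg] at h; cases h
  have hnoI : ¬ pvGin cs k := by rintro ⟨-, h, -⟩; rw [hg] at h; cases h
  refine ⟨?_, ?_, ?_⟩
  · intro x; rw [Hout x]
    constructor
    · rintro ⟨i, hi, hp⟩; exact ⟨i, by omega, hp⟩
    · rintro ⟨i, hi, hp, hw⟩
      rcases Nat.lt_succ_iff_lt_or_eq.mp hi with h | h
      · exact ⟨i, h, hp, hw⟩
      · subst h; exact absurd hp hnoG
  · intro x; rw [Hin x]
    constructor
    · rintro ⟨j, hj, hp⟩; exact ⟨j, by omega, hp⟩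
    · rintro ⟨j, hj, hp, hw⟩
      rcases Nat.lt_succ_iff_lt_or_eq.mp hj with h | h
      · exact ⟨j, h, hp, hw⟩
      · subst h; exact absurd hp hnoI
  · rintro ⟨i, hi, j, hj, hio, hjo, heq⟩
    rcases Nat.lt_succ_iff_lt_or_eq.mp hi with h | h
    · rcases Nat.lt_succ_iff_lt_or_eq.mp hj with h' | h'
      · exact Hno ⟨i, h, j, h', hio, hjo, heq⟩
      · subst h'; exact hnoI hjo
    · subst h; exact hnoG hio

-- A's loop, generalised: from step k with states describing the prefix
lemma pv_loopA_iff (cs : List Char) :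
    ∀ (m k : Nat) (outside inside : PySem.Set (List Char)),
      cs.length - 2 ≤ k + m →
      (∀ x, x ∈ outside ↔ ∃ i, i < k ∧ pvGout cs i ∧ pvWin cs i = x) →
      (∀ x, x ∈ inside ↔ ∃ j, j < k ∧ pvGin cs j ∧ pvWin cs j = x) →
      (¬ ∃ i, i < k ∧ ∃ j, j < k ∧ pvGout cs i ∧ pvGin cs j ∧ pvWin cs j = pvBabA (pvWin cs i)) →
      (pvLoopA cs (PySem.List.pyRange (k : Int) ((cs.length : Int) - 2) 1) outside inside (pvDep cs k) = true
        ↔ pvCross cs) := by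
  intro m
  induction m with
  | zero =>
    intro k outside inside hfuel Hout Hin Hno
    exact pv_loopA_nil_iff cs k outside inside (by omega) Hno
  | succ m ih =>
    intro k outside inside hfuel Hout Hin Hno
    by_cases hklt : (k : Int) < (cs.length : Int) - 2
    case neg => exact pv_loopA_nil_iff cs k outside inside (by omega) Hno
    case pos =>
    have hk2 : k + 2 < cs.length := by omega
    have hkl : k < cs.length := by omega
    have hget : PySem.List.pyGet? cs (k : Int) = some cs[k] := by
      rw [PySem.List.pyGet?_natCast]; exact List.getElem?_eq_getElem hkl
    have hsucc : ((k : Int) + 1) = ((k + 1 : Nat) : Int) := by push_cast; ring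
    rw [PySem.List.pyRange_one_cons hklt]
    simp only [pvLoopA]
    rw [pv_slice_win, hsucc]
    by_cases hb1 : cs[k] = '['
    · rw [if_pos (by rw [hget, hb1]; rfl)]
      have hg : pvGoodB (pvWin cs k) = false :=
        pv_good_bracket_mem (c := cs[k]) (by rw [hb1]; rfl)
          (by rw [pv_win_eq cs k hk2]; simp)
      obtain ⟨Hout', Hin', Hno'⟩ := pv_step_dead cs k hg Hout Hin Hno
      rw [show pvDep cs k + 1 = pvDep cs (k+1) by rw [pv_dep_succ cs k hkl, if_pos hb1]]
      exact ih (k+1) outside inside (by omega) Hout' Hin' Hno'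
    · rw [if_neg (by rw [hget]; simp [hb1])]
      by_cases hb2 : cs[k] = ']'
      · rw [if_pos (by rw [hget, hb2]; rfl)]
        have hg : pvGoodB (pvWin cs k) = false :=
          pv_good_bracket_mem (c := cs[k]) (by rw [hb2]; rfl)
            (by rw [pv_win_eq cs k hk2]; simp)
        obtain ⟨Hout', Hin', Hno'⟩ := pv_step_dead cs k hg Hout Hin Hno
        rw [show pvDep cs k - 1 = pvDep cs (k+1) by
              rw [pv_dep_succ cs k hkl, if_neg hb1, if_pos hb2]; ring]
        exact ih (k+1) outside inside (by omega) Hout' Hin' Hno'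
      · rw [if_neg (by rw [hget]; simp [hb2])]
        have hdepeq : pvDep cs (k+1) = pvDep cs k := by
          rw [pv_dep_succ cs k hkl, if_neg hb1, if_neg hb2]; ring
        by_cases hg : pvGoodB (pvWin cs k) = true
        · rw [if_pos (by rw [pv_isAba_eq cs k]; exact hg)]
          by_cases hdep : pvDep cs k ≠ 0
          · rw [if_pos hdep]
            have hGin : pvGin cs k := ⟨hk2, hg, hdep⟩
            have hGoutK : ¬ pvGout cs k := by rintro ⟨-, -, h0⟩; exact hdep h0
            by_cases hmem : pvBabA (pvWin cs k) ∈ outside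
            · rw [if_pos hmem]
              constructor
              · intro _
                obtain ⟨i, hik, hGouti, hwi⟩ := (Hout _).mp hmem
                exact ⟨i, k, hGouti, hGin, by rw [hwi, pv_bab_bab hg]⟩
              · intro _; rfl
            · rw [if_neg hmem]
              rw [show pvDep cs k = pvDep cs (k+1) from hdepeq.symm]
              apply ih (k+1) outside (inside.add (pvWin cs k)) (by omega)
              · intro x; rw [Hout x]
                constructor
                · rintro ⟨i, hi, hp⟩; exact ⟨i, by omega, hp⟩
                · rintro ⟨i, hi, hp, hw⟩
                  rcases Nat.lt_succ_iff_lt_or_eq.mp hi with h | h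
                  · exact ⟨i, h, hp, hw⟩
                  · subst h; exact absurd hp hGoutK
              · intro x
                rw [PySem.Set.mem_add]
                constructor
                · rintro (hx | hx)
                  · obtain ⟨j, hj, hp⟩ := (Hin x).mp hx; exact ⟨j, by omega, hp⟩
                  · exact ⟨k, by omega, hGin, hx.symm⟩
                · rintro ⟨j, hj, hgj, hwj⟩
                  rcases Nat.lt_succ_iff_lt_or_eq.mp hj with h | h
                  · exact Or.inl ((Hin x).mpr ⟨j, h, hgj, hwj⟩)
                  · subst h; exact Or.inr hwj.symm
              · rintro ⟨i, hi, j, hj, hio, hjo, heq⟩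
                rcases Nat.lt_succ_iff_lt_or_eq.mp hj with hj' | hj'
                · rcases Nat.lt_succ_iff_lt_or_eq.mp hi with hi' | hi'
                  · exact Hno ⟨i, hi', j, hj', hio, hjo, heq⟩
                  · subst hi'; exact hGoutK hio
                · subst hj'
                  rcases Nat.lt_succ_iff_lt_or_eq.mp hi with hi' | hi'
                  · apply hmem
                    have h2 : pvWin cs i = pvBabA (pvBabA (pvWin cs i)) := (pv_bab_bab hio.2.1).symm
                    rw [← heq] at h2
                    exact (Hout _).mpr ⟨i, hi', hio, h2⟩
                  · subst hi'; exact hGoutK hio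
          · rw [if_neg hdep]
            have h0 : pvDep cs k = 0 := by push_neg at hdep; exact hdep
            have hGout : pvGout cs k := ⟨hk2, hg, h0⟩
            have hGinK : ¬ pvGin cs k := by rintro ⟨-, -, hne⟩; exact hne h0
            by_cases hmem : pvBabA (pvWin cs k) ∈ inside
            · rw [if_pos hmem]
              constructor
              · intro _
                obtain ⟨j, hjk, hGinj, hwj⟩ := (Hin _).mp hmem
                exact ⟨k, j, hGout, hGinj, hwj⟩
              · intro _; rfl
            · rw [if_neg hmem]
              rw [show pvDep cs k = pvDep cs (k+1) from hdepeq.symm]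
              apply ih (k+1) (outside.add (pvWin cs k)) inside (by omega)
              · intro x
                rw [PySem.Set.mem_add]
                constructor
                · rintro (hx | hx)
                  · obtain ⟨i, hi, hp⟩ := (Hout x).mp hx; exact ⟨i, by omega, hp⟩
                  · exact ⟨k, by omega, hGout, hx.symm⟩
                · rintro ⟨i, hi, hgi, hwi⟩
                  rcases Nat.lt_succ_iff_lt_or_eq.mp hi with h | h
                  · exact Or.inl ((Hout x).mpr ⟨i, h, hgi, hwi⟩)
                  · subst h; exact Or.inr hwi.symm
              · intro x; rw [Hin x]
                constructor
                · rintro ⟨j, hj, hp⟩; exact ⟨j, by omega, hp⟩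
                · rintro ⟨j, hj, hp, hw⟩
                  rcases Nat.lt_succ_iff_lt_or_eq.mp hj with h | h
                  · exact ⟨j, h, hp, hw⟩
                  · subst h; exact absurd hp hGinK
              · rintro ⟨i, hi, j, hj, hio, hjo, heq⟩
                rcases Nat.lt_succ_iff_lt_or_eq.mp hi with hi' | hi'
                · rcases Nat.lt_succ_iff_lt_or_eq.mp hj with hj' | hj'
                  · exact Hno ⟨i, hi', j, hj', hio, hjo, heq⟩
                  · subst hj'; exact hGinK hjo
                · subst hi'
                  rcases Nat.lt_succ_iff_lt_or_eq.mp hj with hj' | hj'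
                  · apply hmem
                    rw [← heq]
                    exact (Hin _).mpr ⟨j, hj', hjo, rfl⟩
                  · subst hj'; exact hGinK hjo
        · rw [if_neg (by rw [pv_isAba_eq cs k]; exact hg)]
          have hgf : pvGoodB (pvWin cs k) = false := Bool.eq_false_iff.mpr hg
          obtain ⟨Hout', Hin', Hno'⟩ := pv_step_dead cs k hgf Hout Hin Hno
          rw [show pvDep cs k = pvDep cs (k+1) from hdepeq.symm]
          exact ih (k+1) outside inside (by omega) Hout' Hin' Hno'

lemma pv_A_iff (s : String) : is_ssl s = true ↔ pvCross s.toList := by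
  have h1 : ∀ x, x ∈ ([] : PySem.Set (List Char)) ↔
      ∃ i, i < 0 ∧ pvGout s.toList i ∧ pvWin s.toList i = x := by
    intro x; simp
  have h2 : ∀ x, x ∈ ([] : PySem.Set (List Char)) ↔
      ∃ j, j < 0 ∧ pvGin s.toList j ∧ pvWin s.toList j = x := by
    intro x; simp
  have h3 : ¬ ∃ i, i < 0 ∧ ∃ j, j < 0 ∧ pvGout s.toList i ∧ pvGin s.toList j ∧
      pvWin s.toList j = pvBabA (pvWin s.toList i) := by
    rintro ⟨i, hi, -⟩; omega
  have hmain := pv_loopA_iff s.toList s.toList.length 0 [] [] (by omega) h1 h2 h3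
  rw [pv_dep_zero] at hmain
  rw [show ((0 : Nat) : Int) = (0 : Int) from rfl] at hmain
  have hlen : PySem.Str.len s = (s.toList.length : Int) := by simp
  unfold is_ssl
  rw [hlen]
  exact hmain

-- ---------- B side ----------

-- prepend a prefix onto the first segment
def pvConsApp (cur : List Char) : List (List Char × Bool) → List (List Char × Bool)
  | [] => []
  | (sg, f) :: r => (cur ++ sg, f) :: r

-- clean recursion computing what pvParseB appends
def pvSegsOf (cs : List Char) (d : Int) : List (List Char × Bool) :=
  match cs with
  | [] => [([], decide (d ≠ 0))]
  | c :: t =>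
    if c == '[' || c == ']' then
      ([], decide (d ≠ 0)) :: pvSegsOf t (d + (if c == '[' then 1 else -1))
    else
      pvConsApp [c] (pvSegsOf t d)

lemma pv_segsOf_head (cs : List Char) (d : Int) :
    ∃ r, pvSegsOf cs d =
      (cs.takeWhile (fun c => !(c == '[' || c == ']')), decide (d ≠ 0)) :: r := by
  induction cs generalizing d with
  | nil => exact ⟨[], by simp [pvSegsOf]⟩
  | cons c t ih =>
    by_cases hc : (c == '[' || c == ']') = true
    · refine ⟨pvSegsOf t (d + (if c == '[' then 1 else -1)), ?_⟩
      simp only [pvSegsOf]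
      rw [if_pos hc, List.takeWhile_cons_of_neg (by simp [hc])]
    · obtain ⟨r, hr⟩ := ih d
      refine ⟨r, ?_⟩
      simp only [pvSegsOf]
      rw [if_neg hc, hr]
      simp only [pvConsApp]
      rw [List.takeWhile_cons_of_pos (by simp [hc])]
      simp

lemma pv_parse_eq (cs : List Char) :
    ∀ (segs : List (List Char × Bool)) (d : Int) (cur : List Char),
      pvParseB cs segs d cur = segs ++ pvConsApp cur (pvSegsOf cs d) := by
  induction cs with
  | nil => intro segs d cur; simp [pvParseB, pvSegsOf, pvConsApp]
  | cons c t ih =>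
    intro segs d cur
    by_cases hc : (c == '[' || c == ']') = true
    · simp only [pvParseB, pvSegsOf]
      rw [if_pos hc, if_pos hc, ih]
      obtain ⟨r, hr⟩ := pv_segsOf_head t (d + (if c == '[' then 1 else -1))
      rw [hr]
      simp [pvConsApp]
    · simp only [pvParseB, pvSegsOf]
      rw [if_neg hc, if_neg hc, ih]
      obtain ⟨r, hr⟩ := pv_segsOf_head t d
      rw [hr]
      simp [pvConsApp]

lemma pv_extractB_nil (seg : List Char) (f : Bool) (k : Nat)
    (outside inside : PySem.Set (List Char)) (x : List Char)
    (hk : (seg.length : Int) - 2 ≤ (k : Int)) :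
    ((x ∈ (pvExtractB seg f (PySem.List.pyRange (k : Int) ((seg.length : Int) - 2) 1) outside inside).1 ↔
        x ∈ outside ∨ (f = false ∧ ∃ j, k ≤ j ∧ pvGoodB (pvWin seg j) = true ∧ pvWin seg j = x)) ∧
     (x ∈ (pvExtractB seg f (PySem.List.pyRange (k : Int) ((seg.length : Int) - 2) 1) outside inside).2 ↔
        x ∈ inside ∨ (f = true ∧ ∃ j, k ≤ j ∧ pvGoodB (pvWin seg j) = true ∧ pvWin seg j = x))) := by
  rw [PySem.List.pyRange_one_eq_nil hk]
  simp only [pvExtractB]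
  constructor
  · constructor
    · exact fun h => Or.inl h
    · rintro (h | ⟨-, j, hj, hgj, -⟩)
      · exact h
      · have := pv_good_len hgj; omega
  · constructor
    · exact fun h => Or.inl h
    · rintro (h | ⟨-, j, hj, hgj, -⟩)
      · exact h
      · have := pv_good_len hgj; omega

lemma pv_extractB_mem (seg : List Char) (f : Bool) :
    ∀ (m k : Nat) (outside inside : PySem.Set (List Char)) (x : List Char),
      seg.length - 2 ≤ k + m →
      ((x ∈ (pvExtractB seg f (PySem.List.pyRange (k : Int) ((seg.length : Int) - 2) 1) outside inside).1 ↔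
          x ∈ outside ∨ (f = false ∧ ∃ j, k ≤ j ∧ pvGoodB (pvWin seg j) = true ∧ pvWin seg j = x)) ∧
       (x ∈ (pvExtractB seg f (PySem.List.pyRange (k : Int) ((seg.length : Int) - 2) 1) outside inside).2 ↔
          x ∈ inside ∨ (f = true ∧ ∃ j, k ≤ j ∧ pvGoodB (pvWin seg j) = true ∧ pvWin seg j = x))) := by
  intro m
  induction m with
  | zero =>
    intro k outside inside x hfuel
    exact pv_extractB_nil seg f k outside inside x (by omega)
  | succ m ih =>
    intro k outside inside x hfuel
    by_cases hklt : (k : Int) < (seg.length : Int) - 2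
    case neg => exact pv_extractB_nil seg f k outside inside x (by omega)
    case pos =>
    rw [PySem.List.pyRange_one_cons hklt]
    simp only [pvExtractB]
    rw [pv_slice_win, show ((k : Int) + 1) = ((k + 1 : Nat) : Int) by push_cast; ring]
    by_cases hg : pvGoodB (pvWin seg k) = true
    · rw [if_pos hg]
      cases f with
      | false =>
        rw [if_neg (by simp)]
        obtain ⟨ih1, ih2⟩ := ih (k+1) (outside.add (pvWin seg k)) inside x (by omega)
        constructor
        · rw [ih1, PySem.Set.mem_add]
          constructor
          · rintro ((h | h) | ⟨-, j, hj, hgj, hwj⟩)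
            · exact Or.inl h
            · exact Or.inr ⟨rfl, k, le_refl k, hg, h.symm⟩
            · exact Or.inr ⟨rfl, j, by omega, hgj, hwj⟩
          · rintro (h | ⟨-, j, hj, hgj, hwj⟩)
            · exact Or.inl (Or.inl h)
            · by_cases hjk : j = k
              · subst hjk; exact Or.inl (Or.inr hwj.symm)
              · exact Or.inr ⟨rfl, j, by omega, hgj, hwj⟩
        · rw [ih2]
          constructor
          · rintro (h | ⟨hf, -⟩)
            · exact Or.inl h
            · simp at hf
          · rintro (h | ⟨hf, -⟩)
            · exact Or.inl h
            · simp at hf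
      | true =>
        rw [if_pos rfl]
        obtain ⟨ih1, ih2⟩ := ih (k+1) outside (inside.add (pvWin seg k)) x (by omega)
        constructor
        · rw [ih1]
          constructor
          · rintro (h | ⟨hf, -⟩)
            · exact Or.inl h
            · simp at hf
          · rintro (h | ⟨hf, -⟩)
            · exact Or.inl h
            · simp at hf
        · rw [ih2, PySem.Set.mem_add]
          constructor
          · rintro ((h | h) | ⟨-, j, hj, hgj, hwj⟩)
            · exact Or.inl h
            · exact Or.inr ⟨rfl, k, le_refl k, hg, h.symm⟩
            · exact Or.inr ⟨rfl, j, by omega, hgj, hwj⟩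
          · rintro (h | ⟨-, j, hj, hgj, hwj⟩)
            · exact Or.inl (Or.inl h)
            · by_cases hjk : j = k
              · subst hjk; exact Or.inl (Or.inr hwj.symm)
              · exact Or.inr ⟨rfl, j, by omega, hgj, hwj⟩
    · rw [if_neg hg]
      obtain ⟨ih1, ih2⟩ := ih (k+1) outside inside x (by omega)
      constructor
      · rw [ih1]
        constructor
        · rintro (h | ⟨hf, j, hj, hgj, hwj⟩)
          · exact Or.inl h
          · exact Or.inr ⟨hf, j, by omega, hgj, hwj⟩
        · rintro (h | ⟨hf, j, hj, hgj, hwj⟩)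
          · exact Or.inl h
          · by_cases hjk : j = k
            · subst hjk; exact absurd hgj hg
            · exact Or.inr ⟨hf, j, by omega, hgj, hwj⟩
      · rw [ih2]
        constructor
        · rintro (h | ⟨hf, j, hj, hgj, hwj⟩)
          · exact Or.inl h
          · exact Or.inr ⟨hf, j, by omega, hgj, hwj⟩
        · rintro (h | ⟨hf, j, hj, hgj, hwj⟩)
          · exact Or.inl h
          · by_cases hjk : j = k
            · subst hjk; exact absurd hgj hg
            · exact Or.inr ⟨hf, j, by omega, hgj, hwj⟩

lemma pv_extractSegs_mem (segs : List (List Char × Bool)) :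
    ∀ (outside inside : PySem.Set (List Char)) (x : List Char),
      ((x ∈ (pvExtractSegsB segs outside inside).1 ↔
          x ∈ outside ∨ ∃ p ∈ segs, p.2 = false ∧ ∃ j, pvGoodB (pvWin p.1 j) = true ∧ pvWin p.1 j = x) ∧
       (x ∈ (pvExtractSegsB segs outside inside).2 ↔
          x ∈ inside ∨ ∃ p ∈ segs, p.2 = true ∧ ∃ j, pvGoodB (pvWin p.1 j) = true ∧ pvWin p.1 j = x)) := by
  induction segs with
  | nil => intro outside inside x; simp [pvExtractSegsB]
  | cons q rest ih =>
    obtain ⟨seg, f⟩ := q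
    intro outside inside x
    simp only [pvExtractSegsB]
    have hL : PySem.Chars.len seg = (seg.length : Int) := by simp
    rw [hL, show (0 : Int) = ((0 : Nat) : Int) from rfl]
    have hE := pv_extractB_mem seg f seg.length 0 outside inside x (by omega)
    obtain ⟨R1, R2⟩ := ih (pvExtractB seg f
        (PySem.List.pyRange ((0 : Nat) : Int) ((seg.length : Int) - 2) 1) outside inside).1
      (pvExtractB seg f
        (PySem.List.pyRange ((0 : Nat) : Int) ((seg.length : Int) - 2) 1) outside inside).2 x
    constructor
    · rw [R1]
      constructor
      · rintro (hx | ⟨p, hp, hP⟩)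
        · rcases hE.1.mp hx with h | ⟨hf, j, -, hgj, hwj⟩
          · exact Or.inl h
          · exact Or.inr ⟨(seg, f), by simp, hf, j, hgj, hwj⟩
        · exact Or.inr ⟨p, List.mem_cons_of_mem _ hp, hP⟩
      · rintro (hx | ⟨p, hp, hP⟩)
        · exact Or.inl (hE.1.mpr (Or.inl hx))
        · rcases List.mem_cons.mp hp with rfl | hp'
          · obtain ⟨hf, j, hgj, hwj⟩ := hP
            exact Or.inl (hE.1.mpr (Or.inr ⟨hf, j, Nat.zero_le j, hgj, hwj⟩))
          · exact Or.inr ⟨p, hp', hP⟩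
    · rw [R2]
      constructor
      · rintro (hx | ⟨p, hp, hP⟩)
        · rcases hE.2.mp hx with h | ⟨hf, j, -, hgj, hwj⟩
          · exact Or.inl h
          · exact Or.inr ⟨(seg, f), by simp, hf, j, hgj, hwj⟩
        · exact Or.inr ⟨p, List.mem_cons_of_mem _ hp, hP⟩
      · rintro (hx | ⟨p, hp, hP⟩)
        · exact Or.inl (hE.2.mpr (Or.inl hx))
        · rcases List.mem_cons.mp hp with rfl | hp'
          · obtain ⟨hf, j, hgj, hwj⟩ := hP
            exact Or.inl (hE.2.mpr (Or.inr ⟨hf, j, Nat.zero_le j, hgj, hwj⟩))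
          · exact Or.inr ⟨p, hp', hP⟩

lemma pv_good_nil : pvGoodB [] = false := rfl

-- splitting the windows of a cons
lemma pv_win_cons_split (a : Char) (l : List Char) (x : List Char) :
    (∃ j, pvGoodB (pvWin (a :: l) j) = true ∧ pvWin (a :: l) j = x) ↔
    ((pvGoodB (pvWin (a :: l) 0) = true ∧ pvWin (a :: l) 0 = x) ∨
     (∃ j, pvGoodB (pvWin l j) = true ∧ pvWin l j = x)) := by
  constructor
  · rintro ⟨_ | j, h⟩
    · exact Or.inl h
    · exact Or.inr ⟨j, h⟩
  · rintro (h | ⟨j, h⟩)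
    · exact ⟨0, h⟩
    · exact ⟨j + 1, h⟩

-- splitting an existential over a cons of segments
lemma pv_ex_seg_cons (q : List Char × Bool) (r : List (List Char × Bool)) (flag : Bool) (x : List Char) :
    (∃ p ∈ q :: r, p.2 = flag ∧ ∃ j, pvGoodB (pvWin p.1 j) = true ∧ pvWin p.1 j = x) ↔
    ((q.2 = flag ∧ ∃ j, pvGoodB (pvWin q.1 j) = true ∧ pvWin q.1 j = x) ∨
     (∃ p ∈ r, p.2 = flag ∧ ∃ j, pvGoodB (pvWin p.1 j) = true ∧ pvWin p.1 j = x)) := by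
  constructor
  · rintro ⟨p, hp, hpf, j, hgj, hwj⟩
    rcases List.mem_cons.mp hp with rfl | hp'
    · exact Or.inl ⟨hpf, j, hgj, hwj⟩
    · exact Or.inr ⟨p, hp', hpf, j, hgj, hwj⟩
  · rintro (⟨hf, j, hgj, hwj⟩ | ⟨p, hp', hpf, j, hgj, hwj⟩)
    · exact ⟨q, by simp, hf, j, hgj, hwj⟩
    · exact ⟨p, List.mem_cons_of_mem _ hp', hpf, j, hgj, hwj⟩

-- first-window agreement between a segment head and the full string
lemma pv_window_takeWhile (c : Char) (t : List Char) (hc : (c == '[' || c == ']') = false) (x : List Char) :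
    (pvGoodB (pvWin (c :: t.takeWhile (fun c => !(c == '[' || c == ']'))) 0) = true ∧
       pvWin (c :: t.takeWhile (fun c => !(c == '[' || c == ']'))) 0 = x) ↔
    (pvGoodB (pvWin (c :: t) 0) = true ∧ pvWin (c :: t) 0 = x) := by
  rcases t with _ | ⟨a, t'⟩
  · simp
  · by_cases ha : (a == '[' || a == ']') = true
    · rw [List.takeWhile_cons_of_neg (by simp [ha])]
      constructor <;> rintro ⟨hg, -⟩
      · have hf : pvGoodB (pvWin ([c] : List Char) 0) = false := pv_good_short (by simp [pvWin])
        rw [hf] at hg; cases hg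
      · have hf : pvGoodB (pvWin (c :: a :: t') 0) = false :=
          pv_good_bracket_mem ha (by simp [pvWin])
        rw [hf] at hg; cases hg
    · rw [List.takeWhile_cons_of_pos (by simp [ha])]
      rcases t' with _ | ⟨b, t''⟩
      · simp
      · by_cases hb : (b == '[' || b == ']') = true
        · rw [List.takeWhile_cons_of_neg (by simp [hb])]
          constructor <;> rintro ⟨hg, -⟩
          · have hf : pvGoodB (pvWin ([c, a] : List Char) 0) = false := pv_good_short (by simp [pvWin])
            rw [hf] at hg; cases hg
          · have hf : pvGoodB (pvWin (c :: a :: b :: t'') 0) = false :=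
              pv_good_bracket_mem hb (by simp [pvWin])
            rw [hf] at hg; cases hg
        · rw [List.takeWhile_cons_of_pos (by simp [hb])]
          have h1 : pvWin (c :: a :: b :: t''.takeWhile (fun c => !(c == '[' || c == ']'))) 0
              = [c, a, b] := by simp [pvWin]
          have h2 : pvWin (c :: a :: b :: t'') 0 = [c, a, b] := by simp [pvWin]
          rw [h1, h2]

-- segment windows = global windows, with the matching depth flag
lemma pv_segs_windows (cs : List Char) :
    ∀ (d : Int) (flag : Bool) (x : List Char),
      (∃ p ∈ pvSegsOf cs d, p.2 = flag ∧ ∃ j, pvGoodB (pvWin p.1 j) = true ∧ pvWin p.1 j = x) ↔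
      (∃ i, pvGoodB (pvWin cs i) = true ∧ pvWin cs i = x ∧ decide (d + pvDep cs i ≠ 0) = flag) := by
  induction cs with
  | nil =>
    intro d flag x
    simp only [pvSegsOf]
    constructor
    · rintro ⟨p, hp, -, j, hgj, -⟩
      simp only [List.mem_singleton] at hp
      subst hp
      have hn : pvWin ([] : List Char) j = [] := by simp [pvWin]
      rw [hn, pv_good_nil] at hgj; cases hgj
    · rintro ⟨i, hgi, -⟩
      have hn : pvWin ([] : List Char) i = [] := by simp [pvWin]
      rw [hn, pv_good_nil] at hgi; cases hgi
  | cons c t ih =>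
    intro d flag x
    by_cases hc : (c == '[' || c == ']') = true
    · have hcd : c = '[' ∨ c = ']' := by simpa using hc
      simp only [pvSegsOf]
      rw [if_pos hc]
      rw [pv_ex_seg_cons]
      constructor
      · rintro (⟨-, j, hgj, -⟩ | hrest)
        · have hn : pvWin ([] : List Char) j = [] := by simp [pvWin]
          rw [hn, pv_good_nil] at hgj; cases hgj
        · obtain ⟨i, hgi, hwi, hfl⟩ := (ih (d + (if c == '[' then 1 else -1)) flag x).mp hrest
          refine ⟨i + 1, hgi, hwi, ?_⟩
          rw [pv_dep_cons]
          rcases hcd with rfl | rfl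
          · rw [if_pos rfl]
            rw [show (if (('[' : Char) == '[') = true then (1 : Int) else -1) = 1 from rfl] at hfl
            simpa [add_assoc] using hfl
          · rw [if_neg (by decide), if_pos rfl]
            rw [show (if ((']' : Char) == '[') = true then (1 : Int) else -1) = -1 from rfl] at hfl
            simpa [add_assoc] using hfl
      · rintro ⟨i, hgi, hwi, hfl⟩
        rcases i with _ | i
        · exfalso
          have hmem : c ∈ pvWin (c :: t) 0 := by simp [pvWin]
          rw [pv_good_bracket_mem hc hmem] at hgi; cases hgi
        · refine Or.inr ((ih (d + (if c == '[' then 1 else -1)) flag x).mpr ⟨i, hgi, hwi, ?_⟩)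
          rw [pv_dep_cons] at hfl
          rcases hcd with rfl | rfl
          · rw [if_pos rfl] at hfl
            rw [show (if (('[' : Char) == '[') = true then (1 : Int) else -1) = 1 from rfl]
            simpa [add_assoc] using hfl
          · rw [if_neg (by decide), if_pos rfl] at hfl
            rw [show (if ((']' : Char) == '[') = true then (1 : Int) else -1) = -1 from rfl]
            simpa [add_assoc] using hfl
    · have hc' : (c == '[' || c == ']') = false := Bool.eq_false_iff.mpr hc
      have hcc : ¬ c = '[' ∧ ¬ c = ']' := by simpa using hc'
      obtain ⟨r, hr⟩ := pv_segsOf_head t d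
      simp only [pvSegsOf]
      rw [if_neg hc, hr]
      simp only [pvConsApp, List.singleton_append]
      rw [pv_ex_seg_cons]
      have hW := pv_window_takeWhile c t hc' x
      have hLt : ((decide (d ≠ 0) = flag ∧
              ∃ j, pvGoodB (pvWin (t.takeWhile (fun c => !(c == '[' || c == ']'))) j) = true ∧
                pvWin (t.takeWhile (fun c => !(c == '[' || c == ']'))) j = x) ∨
            (∃ p ∈ r, p.2 = flag ∧ ∃ j, pvGoodB (pvWin p.1 j) = true ∧ pvWin p.1 j = x)) ↔
          (∃ i, pvGoodB (pvWin t i) = true ∧ pvWin t i = x ∧ decide (d + pvDep t i ≠ 0) = flag) := by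
        rw [← ih d flag x, hr, pv_ex_seg_cons]
      have hwinL := pv_win_cons_split c (t.takeWhile (fun c => !(c == '[' || c == ']'))) x
      have hsplitR : (∃ i, pvGoodB (pvWin (c :: t) i) = true ∧ pvWin (c :: t) i = x ∧
            decide (d + pvDep (c :: t) i ≠ 0) = flag) ↔
          ((pvGoodB (pvWin (c :: t) 0) = true ∧ pvWin (c :: t) 0 = x ∧ decide (d ≠ 0) = flag) ∨
           (∃ i, pvGoodB (pvWin t i) = true ∧ pvWin t i = x ∧ decide (d + pvDep t i ≠ 0) = flag)) := by
        constructor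
        · rintro ⟨_ | i, hg, hw, hf⟩
          · left
            refine ⟨hg, hw, ?_⟩
            rw [pv_dep_zero] at hf
            simpa using hf
          · right
            refine ⟨i, hg, hw, ?_⟩
            rw [pv_dep_cons, if_neg hcc.1, if_neg hcc.2] at hf
            rw [show d + ((0 : Int) + pvDep t i) = d + pvDep t i from by ring] at hf
            exact hf
        · rintro (⟨hg, hw, hf⟩ | ⟨i, hg, hw, hf⟩)
          · refine ⟨0, hg, hw, ?_⟩
            rw [pv_dep_zero]
            simpa using hf
          · refine ⟨i + 1, hg, hw, ?_⟩
            rw [pv_dep_cons, if_neg hcc.1, if_neg hcc.2]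
            rw [show d + ((0 : Int) + pvDep t i) = d + pvDep t i from by ring]
            exact hf
      rw [hsplitR, hwinL]
      constructor
      · rintro (⟨hd, hw0 | hwt⟩ | hLr)
        · exact Or.inl ⟨(hW.mp hw0).1, (hW.mp hw0).2, hd⟩
        · exact Or.inr (hLt.mp (Or.inl ⟨hd, hwt⟩))
        · exact Or.inr (hLt.mp (Or.inr hLr))
      · rintro (⟨hg, he, hd⟩ | hrt)
        · exact Or.inl ⟨hd, Or.inl (hW.mpr ⟨hg, he⟩)⟩
        · rcases hLt.mpr hrt with h | h
          · exact Or.inl ⟨h.1, Or.inr h.2⟩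
          · exact Or.inr h

lemma pv_B_iff (s : String) : is_ssl_alt s = true ↔ pvCross s.toList := by
  simp only [is_ssl_alt]
  obtain ⟨r, hr⟩ := pv_segsOf_head s.toList 0
  have hparse : pvParseB s.toList [] 0 [] = pvSegsOf s.toList 0 := by
    rw [pv_parse_eq s.toList [] 0 [], hr]
    simp [pvConsApp]
  rw [hparse, List.any_eq_true]
  constructor
  · rintro ⟨w, hw, hbab⟩
    rw [decide_eq_true_eq] at hbab
    rcases ((pv_extractSegs_mem _ [] [] w).1).mp hw with h | ⟨p, hp, hpf, j, hgj, hwj⟩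
    · simp at h
    obtain ⟨i, hgi, hwi, hfl⟩ := (pv_segs_windows s.toList 0 false w).mp ⟨p, hp, hpf, j, hgj, hwj⟩
    have hdep0 : pvDep s.toList i = 0 := by simpa using hfl
    rcases ((pv_extractSegs_mem _ [] [] (pvBabB w)).2).mp hbab with h | ⟨q, hq, hqf, j', hgj', hwj'⟩
    · simp at h
    obtain ⟨j2, hgj2, hwj2, hfl2⟩ :=
      (pv_segs_windows s.toList 0 true (pvBabB w)).mp ⟨q, hq, hqf, j', hgj', hwj'⟩
    have hdepn : pvDep s.toList j2 ≠ 0 := by simpa using hfl2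
    refine ⟨i, j2, ⟨pv_good_len hgi, hgi, hdep0⟩, ⟨pv_good_len hgj2, hgj2, hdepn⟩, ?_⟩
    rw [hwj2, pvBabB_eq, ← hwi]
  · rintro ⟨i, j, ⟨hi1, hgi, hdep0⟩, ⟨hj1, hgj, hdepn⟩, heq⟩
    refine ⟨pvWin s.toList i, ?_, ?_⟩
    · apply ((pv_extractSegs_mem _ [] [] _).1).mpr
      refine Or.inr ((pv_segs_windows s.toList 0 false _).mpr ?_)
      exact ⟨i, hgi, rfl, by simp [hdep0]⟩
    · rw [decide_eq_true_eq]
      apply ((pv_extractSegs_mem _ [] [] _).2).mpr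
      refine Or.inr ((pv_segs_windows s.toList 0 true _).mpr ?_)
      exact ⟨j, hgj, (show pvWin s.toList j = pvBabB (pvWin s.toList i) by rw [pvBabB_eq]; exact heq),
        by simp [hdepn]⟩

-- ===== VERDICT (by name: the statement is the Claim_ definition above) =====
theorem is_ssl_spec : Claim_equal_is_ssl := by
  intro s _
  unfold Spec_is_ssl
  have hA := pv_A_iff s
  have hB := pv_B_iff s
  cases h1 : is_ssl s <;> cases h2 : is_ssl_alt s <;> simp_all
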